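-- pv_equiv track=rewrite | github.com/BinbinGood/Algorithms | 高级班/class07/04汉诺塔移动状态.py | process
-- ===== SOURCE A (Python) =====
-- def process(arr, i, f, t, o):
--     if i == -1:
--         return 0
--     if arr[i] != f and arr[i] != t:  # 情况三
--         return -1
--     # arr[i] 不是form就是to
--     if arr[i] == f:
--         return process(arr, i - 1, f, o, t)  # 看0~i-1从f移动到o进行到了哪一步
--     else:
--         rest = process(arr, i - 1, o, t, f)  # 看0~i-1从o移动到t进行到了哪一步
--         if rest == -1:
--             return -1
--         else:
--             return (1 << i) + rest
-- ===== SOURCE B (Python) =====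
-- def _step(arr, state, k):
--     # one disk: transform the running state (ans, f, t, o), or None once invalid
--     if state is None:
--         return None
--     ans, f, t, o = state
--     x = arr[k]
--     if x == f:
--         return (ans, f, o, t)
--     if x == t:
--         return (ans + (1 << k), o, t, f)
--     return None
--
-- def process(arr, i, f, t, o):
--     state = (0, f, t, o)
--     for k in range(i, -1, -1):
--         state = _step(arr, state, k)
--     return -1 if state is None else state[0]
-- ===== Notes on version B (the rewrite author's own statement) =====
-- stated objective: alternative
-- what changed: Replaces the recursion (which adds the bit after the recursive call returns, threading peg roles through call arguments) with a fold of a pure step function over the descending disk indices, carrying an optional state (accumulator plus current peg roles) that becomes None at the first invalid disk.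
-- outside the precondition, e.g. on process(['a', 'b'], -2, 'c', 'd', 'e'): A returns -1, B returns 0
import Mathlib
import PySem

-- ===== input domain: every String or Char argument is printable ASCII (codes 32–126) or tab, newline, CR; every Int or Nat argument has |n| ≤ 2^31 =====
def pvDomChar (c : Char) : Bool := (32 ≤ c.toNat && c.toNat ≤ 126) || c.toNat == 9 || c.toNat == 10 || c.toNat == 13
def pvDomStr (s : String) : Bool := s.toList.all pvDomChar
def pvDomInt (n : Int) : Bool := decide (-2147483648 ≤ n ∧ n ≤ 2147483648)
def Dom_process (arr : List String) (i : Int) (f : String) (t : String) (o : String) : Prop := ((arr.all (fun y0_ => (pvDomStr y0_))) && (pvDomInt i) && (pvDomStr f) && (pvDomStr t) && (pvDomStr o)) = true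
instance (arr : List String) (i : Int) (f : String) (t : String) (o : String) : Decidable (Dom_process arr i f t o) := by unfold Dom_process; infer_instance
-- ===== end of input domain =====

-- B re-implements the recursive Hanoi step-index computation as a fold of a pure step
-- function over the descending disk indices, carrying an optional (accumulator, pegs) state
-- (objective: alternative, same cost).

-- ===== PORT A =====
-- A's recursion decrements i down to -1; we run it on the fuel n = i+1 (n = 0 is the
-- Python base case i == -1).  For i < -1 Python either raises IndexError/ValueError or
-- returns -1 via negative-index wraparound (outside Pre_); the port returns -1 there.
def processA (arr : List String) : Nat → String → String → String → Int
  | 0, _, _, _ => 0                                   -- i == -1: return 0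
  | (k+1), f, t, o =>
    match PySem.List.pyGet? arr (k : Int) with        -- arr[i]
    | none => -1                                      -- IndexError (outside Pre_)
    | some x =>
      if x ≠ f ∧ x ≠ t then -1
      else if x = f then processA arr k f o t
      else
        let rest := processA arr k o t f
        if rest = -1 then -1 else 2 ^ k + rest        -- (1 << i) + rest

def process (arr : List String) (i : Int) (f : String) (t : String) (o : String) : Int :=
  if i < -1 then -1 else processA arr (i + 1).toNat f t o

-- ===== PORT B =====
-- Source B's _step: transform the optional state (ans, f, t, o) at disk k, None once invalid.
def stepB (arr : List String) (st : Option (Int × String × String × String)) (k : Nat) :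
    Option (Int × String × String × String) :=
  match st with
  | none => none
  | some (ans, f, t, o) =>
    match PySem.List.pyGet? arr (k : Int) with        -- arr[k]; none = IndexError (outside Pre_)
    | none => none
    | some x =>
      if x = f then some (ans, f, o, t)
      else if x = t then some (ans + 2 ^ k, o, t, f)
      else none

-- the for-loop over range(i, -1, -1) is the fold of _step over [i, i-1, …, 0]
def process_alt (arr : List String) (i : Int) (f : String) (t : String) (o : String) : Int :=
  match (List.range (i + 1).toNat).reverse.foldl (stepB arr) (some (0, f, t, o)) with
  | none => -1
  | some (ans, _, _, _) => ans

-- ===== PRECONDITION & SPEC =====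
-- Pre_ excludes out-of-range base index i: for i ≥ len(arr) A raises IndexError, and for
-- i < -1 A either raises or returns -1 only through accidental negative-index wraparound,
-- a defensible corner no caller relies on (B naturally treats an empty range as 0 moves).
def Pre_process (arr : List String) (i : Int) (f : String) (t : String) (o : String) : Prop :=
  -1 ≤ i ∧ i < (arr.length : Int)
instance (arr : List String) (i : Int) (f : String) (t : String) (o : String) : Decidable (Pre_process arr i f t o) := by unfold Pre_process; infer_instance

def pvWitness_process : List String × Int × String × String × String := (["a", "b"], 1, "a", "b", "c")

def Spec_process (arr : List String) (i : Int) (f : String) (t : String) (o : String) (out : Int) : Prop := out = process_alt arr i f t o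
instance (arr : List String) (i : Int) (f : String) (t : String) (o : String) (out : Int) : Decidable (Spec_process arr i f t o out) := by unfold Spec_process; infer_instance

-- ===== CLAIM (what is proved, stated in full; the proofs are below) =====
def Claim_equal_process : Prop := ∀ (arr : List String) (i : Int) (f : String) (t : String) (o : String), Dom_process arr i f t o → Pre_process arr i f t o → Spec_process arr i f t o (process arr i f t o)

-- ===== LEMMAS AND PROOFS =====

-- A's result is -1 or nonnegative.
lemma processA_lb (arr : List String) : ∀ (n : Nat) (f t o : String),
    processA arr n f t o = -1 ∨ 0 ≤ processA arr n f t o := by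
  intro n
  induction n with
  | zero => intro f t o; right; simp [processA]
  | succ k ih =>
    intro f t o
    simp only [processA]
    cases hg : PySem.List.pyGet? arr (k : Int) with
    | none => left; rfl
    | some x =>
      by_cases h1 : x ≠ f ∧ x ≠ t
      · simp [h1]
      · simp only [if_neg h1]
        by_cases hf : x = f
        · simpa [hf] using ih f o t
        · simp only [if_neg hf]
          rcases ih o t f with h | h
          · left; simp [h]
          · right
            split
            · omega
            · have : (0:Int) < 2 ^ k := by positivity
              omega

-- folding the step function from an invalid state stays invalid
lemma foldl_stepB_none (arr : List String) : ∀ (l : List Nat),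
    l.foldl (stepB arr) none = none := by
  intro l
  induction l with
  | nil => rfl
  | cons a l ih => simpa [List.foldl, stepB] using ih

-- the fold over [n-1, …, 0], read off through Source B's final extraction, computes A's
-- recursion shifted by the accumulator carried in the state
lemma foldl_stepB_eq (arr : List String) : ∀ (n : Nat), n ≤ arr.length →
    ∀ (f t o : String) (ans : Int),
    (match (List.range n).reverse.foldl (stepB arr) (some (ans, f, t, o)) with
     | none => (-1 : Int)
     | some (a, _, _, _) => a) =
      if processA arr n f t o = -1 then -1 else ans + processA arr n f t o := by
  intro n
  induction n with
  | zero => intro _ f t o ans; simp [processA]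
  | succ k ih =>
    intro hn f t o ans
    have hk : k < arr.length := by omega
    have hget : PySem.List.pyGet? arr (k : Int) = some arr[k] := by
      simp [List.getElem?_eq_getElem hk]
    rw [List.range_succ, List.reverse_append]
    simp only [List.reverse_singleton, List.singleton_append, List.foldl_cons]
    simp only [stepB, hget]
    simp only [processA, hget]
    by_cases hf : arr[k] = f
    · have h1 : ¬ (arr[k] ≠ f ∧ arr[k] ≠ t) := by tauto
      rw [if_pos hf, if_neg h1, if_pos hf, ih (by omega)]
    · by_cases ht : arr[k] = t
      · have h1 : ¬ (arr[k] ≠ f ∧ arr[k] ≠ t) := by tauto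
        rw [if_neg hf, if_pos ht, if_neg h1, if_neg hf, ih (by omega)]
        rcases processA_lb arr k o t f with h | h
        · simp [h]
        · have hne : processA arr k o t f ≠ -1 := by omega
          have hpow : (0:Int) < 2 ^ k := by positivity
          have hne2 : 2 ^ k + processA arr k o t f ≠ (-1 : Int) := by omega
          simp only [if_neg hne, if_neg hne2]
          ring
      · have h1 : arr[k] ≠ f ∧ arr[k] ≠ t := ⟨hf, ht⟩
        rw [if_neg hf, if_neg ht, if_pos h1, foldl_stepB_none]
        simp

-- ===== VERDICT (by name: the statement is the Claim_ definition above) =====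
theorem process_spec : Claim_equal_process := by
  intro arr i f t o _hdom hpre
  obtain ⟨h1, h2⟩ := hpre
  unfold Spec_process process process_alt
  rw [if_neg (by omega)]
  have hle : (i + 1).toNat ≤ arr.length := by omega
  rw [foldl_stepB_eq arr _ hle]
  rcases processA_lb arr (i + 1).toNat f t o with h | h
  · simp [h]
  · have : processA arr (i + 1).toNat f t o ≠ -1 := by omega
    rw [if_neg this]
    ring
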